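-- pv_equiv track=rewrite | github.com/EduardAvojan/Nerion-V2- | nerion_digital_physicist/data_mining/github_quality_scraper.py | _validate_rust_syntax
-- ===== SOURCE A (Python) =====
-- def _validate_rust_syntax(before_code: str, after_code: str) -> bool:
--     """Validate Rust syntax using heuristics."""
--     for code in [before_code, after_code]:
--         # Must have some substance
--         lines = [l.strip() for l in code.split('\n') if l.strip() and not l.strip().startswith('//')]
--         if len(lines) < 3:
--             return False
--
--         # Check for balanced braces
--         if code.count('{') != code.count('}'):
--             return False
--         if code.count('(') != code.count(')'):
--             return False
--         if code.count('[') != code.count(']'):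
--             return False
--
--     return True
-- ===== SOURCE B (Python) =====
-- def _substantive(cur):
--     s = ''.join(cur).strip()
--     return bool(s) and not s.startswith('//')
--
--
-- def _scan_ok(code):
--     ob = cb = op = cp = osq = csq = 0
--     substantive = 0
--     cur = []
--     for ch in code:
--         if ch == '\n':
--             if _substantive(cur):
--                 substantive += 1
--             cur = []
--         else:
--             if ch == '{':
--                 ob += 1
--             elif ch == '}':
--                 cb += 1
--             elif ch == '(':
--                 op += 1
--             elif ch == ')':
--                 cp += 1
--             elif ch == '[':
--                 osq += 1
--             elif ch == ']':
--                 csq += 1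
--             cur.append(ch)
--     if _substantive(cur):
--         substantive += 1
--     return substantive >= 3 and ob == cb and op == cp and osq == csq
--
--
-- def _validate_rust_syntax(before_code: str, after_code: str) -> bool:
--     return _scan_ok(before_code) and _scan_ok(after_code)
-- ===== Notes on version B (the rewrite author's own statement) =====
-- stated objective: alternative
-- what changed: B replaces A's separate split/strip line comprehension plus six independent .count scans (seven traversals per string) with a single character pass per string that maintains the six bracket counters and the substantive-line count simultaneously; it trades C-implemented builtin scans for one fused Python-level loop.
import Mathlib
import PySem

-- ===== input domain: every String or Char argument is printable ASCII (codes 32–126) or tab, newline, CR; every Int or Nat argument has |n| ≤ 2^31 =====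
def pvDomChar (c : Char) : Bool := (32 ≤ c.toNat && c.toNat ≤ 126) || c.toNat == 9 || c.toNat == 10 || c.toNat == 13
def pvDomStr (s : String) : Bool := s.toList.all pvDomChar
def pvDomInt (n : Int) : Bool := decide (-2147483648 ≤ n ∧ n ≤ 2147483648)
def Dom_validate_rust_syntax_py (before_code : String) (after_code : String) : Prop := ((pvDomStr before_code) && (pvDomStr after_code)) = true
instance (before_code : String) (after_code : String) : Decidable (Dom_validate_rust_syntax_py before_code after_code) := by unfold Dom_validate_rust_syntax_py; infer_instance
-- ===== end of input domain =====

-- B replaces A's split/strip comprehension plus six independent .count scans with ONE fused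
-- character pass per string (objective: alternative decomposition, same asymptotic cost).

-- ===== PORT A =====
-- one iteration of A's loop body: the line comprehension, the < 3 test, the three bracket checks
def checkA (code : String) : Bool :=
  -- code.split('\n'): the separator is the nonempty literal "\n", so split? is always `some`
  let lines := ((((PySem.Str.split? code "\n").getD []).filter
      (fun l => !(PySem.Str.strip l == "") && !(PySem.Str.startswith (PySem.Str.strip l) "//"))).map
      PySem.Str.strip)
  if lines.length < 3 then false
  else if PySem.Str.count code "{" ≠ PySem.Str.count code "}" then false
  else if PySem.Str.count code "(" ≠ PySem.Str.count code ")" then false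
  else if PySem.Str.count code "[" ≠ PySem.Str.count code "]" then false
  else true

def validate_rust_syntax_py (before_code : String) (after_code : String) : Bool :=
  [before_code, after_code].all checkA

-- ===== PORT B =====
structure ScanSt where
  ob : Nat
  cb : Nat
  op : Nat
  cp : Nat
  osq : Nat
  csq : Nat
  cur : List Char
  subs : Nat
deriving Repr

-- _substantive(cur) of Source B (''.join(cur) is the List Char itself)
def altSub (cur : List Char) : Bool :=
  let s := PySem.Chars.strip cur
  !(s == []) && !(PySem.Chars.startswith s ['/', '/'])

def altStep (st : ScanSt) (ch : Char) : ScanSt :=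
  if ch = '\n' then
    { st with subs := if altSub st.cur then st.subs + 1 else st.subs, cur := [] }
  else
    let st1 :=
      if ch = '{' then { st with ob := st.ob + 1 }
      else if ch = '}' then { st with cb := st.cb + 1 }
      else if ch = '(' then { st with op := st.op + 1 }
      else if ch = ')' then { st with cp := st.cp + 1 }
      else if ch = '[' then { st with osq := st.osq + 1 }
      else if ch = ']' then { st with csq := st.csq + 1 }
      else st
    { st1 with cur := st1.cur ++ [ch] }

-- _scan_ok(code) of Source B
def altScan (code : String) : Bool :=
  let st := code.toList.foldl altStep ⟨0, 0, 0, 0, 0, 0, [], 0⟩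
  let subs := if altSub st.cur then st.subs + 1 else st.subs
  decide (3 ≤ subs) && (st.ob == st.cb) && (st.op == st.cp) && (st.osq == st.csq)

def validate_rust_syntax_py_alt (before_code : String) (after_code : String) : Bool :=
  altScan before_code && altScan after_code

-- ===== PRECONDITION & SPEC =====
def Spec_validate_rust_syntax_py (before_code : String) (after_code : String) (out : Bool) : Prop := out = validate_rust_syntax_py_alt before_code after_code
instance (before_code : String) (after_code : String) (out : Bool) : Decidable (Spec_validate_rust_syntax_py before_code after_code out) := by unfold Spec_validate_rust_syntax_py; infer_instance

-- ===== CLAIM (what is proved, stated in full; the proofs are below) =====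
def Claim_equal_validate_rust_syntax_py : Prop := ∀ (before_code : String) (after_code : String), Dom_validate_rust_syntax_py before_code after_code → Spec_validate_rust_syntax_py before_code after_code (validate_rust_syntax_py before_code after_code)

-- ===== LEMMAS AND PROOFS =====

-- proof-only helpers: the line decomposition of a character list at '\n'
def mapFirst (f : List Char → List Char) : List (List Char) → List (List Char)
  | [] => []
  | x :: xs => f x :: xs

def linesOf : List Char → List (List Char)
  | [] => [[]]
  | c :: rest => if c = '\n' then [] :: linesOf rest else mapFirst (c :: ·) (linesOf rest)

theorem mapFirst_mapFirst (f g : List Char → List Char) (xs : List (List Char)) :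
    mapFirst f (mapFirst g xs) = mapFirst (fun p => f (g p)) xs := by
  cases xs <;> simp [mapFirst]

theorem mapFirst_id (xs : List (List Char)) : mapFirst (fun p => p) xs = xs := by
  cases xs <;> simp [mapFirst]

theorem linesOf_ne_nil (cs : List Char) : linesOf cs ≠ [] := by
  induction cs with
  | nil => simp [linesOf]
  | cons c rest ih =>
    simp only [linesOf]
    split
    · simp
    · cases h : linesOf rest with
      | nil => exact absurd h ih
      | cons x xs => simp [mapFirst]

theorem splitOn_go_newline : ∀ (fuel : Nat) (l cur : List Char) (acc : List (List Char)),
    l.length < fuel →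
    PySem.Chars.splitOn.go ['\n'] fuel l cur acc
      = acc.reverse ++ mapFirst (fun p => cur.reverse ++ p) (linesOf l) := by
  intro fuel
  induction fuel with
  | zero => intro l cur acc h; omega
  | succ fuel ih =>
    intro l cur acc h
    cases l with
    | nil => simp [PySem.Chars.splitOn.go, linesOf, mapFirst]
    | cons c rest =>
      by_cases hc : c = '\n'
      · subst hc
        rw [show PySem.Chars.splitOn.go ['\n'] (fuel+1) ('\n' :: rest) cur acc
              = PySem.Chars.splitOn.go ['\n'] fuel rest [] (cur.reverse :: acc) by
            simp [PySem.Chars.splitOn.go, List.isPrefixOf]]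
        rw [ih rest [] (cur.reverse :: acc) (by simp only [List.length_cons] at h; omega)]
        have hid : mapFirst (fun p => List.reverse [] ++ p) (linesOf rest) = linesOf rest := by
          cases hr : linesOf rest <;> simp [mapFirst]
        rw [hid]
        simp [linesOf, mapFirst]
      · rw [show PySem.Chars.splitOn.go ['\n'] (fuel+1) (c :: rest) cur acc
              = PySem.Chars.splitOn.go ['\n'] fuel rest (c :: cur) acc by
            simp [PySem.Chars.splitOn.go, List.isPrefixOf,
              show ('\n' : Char) ≠ c from fun hh => hc hh.symm]]
        rw [ih rest (c :: cur) acc (by simp only [List.length_cons] at h; omega)]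
        simp [linesOf, hc, mapFirst_mapFirst]

theorem splitOn_newline (cs : List Char) :
    PySem.Chars.splitOn cs ['\n'] = linesOf cs := by
  unfold PySem.Chars.splitOn
  rw [splitOn_go_newline (cs.length + 1) cs [] [] (by omega)]
  simp [mapFirst_id]

theorem count_go_singleton (c : Char) : ∀ (fuel : Nat) (l : List Char) (acc : Nat),
    l.length ≤ fuel →
    PySem.Chars.count.go [c] fuel l acc = acc + l.count c := by
  intro fuel
  induction fuel with
  | zero =>
    intro l acc h
    have : l = [] := List.eq_nil_of_length_eq_zero (by omega)
    subst this; simp [PySem.Chars.count.go]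
  | succ fuel ih =>
    intro l acc h
    cases l with
    | nil => simp [PySem.Chars.count.go]
    | cons x t =>
      by_cases hx : c = x
      · subst hx
        rw [show PySem.Chars.count.go [c] (fuel+1) (c :: t) acc
              = PySem.Chars.count.go [c] fuel t (acc + 1) by
            simp [PySem.Chars.count.go, List.isPrefixOf]]
        rw [ih t (acc + 1) (by simp only [List.length_cons] at h; omega)]
        simp
        omega
      · rw [show PySem.Chars.count.go [c] (fuel+1) (x :: t) acc
              = PySem.Chars.count.go [c] fuel t acc by
            simp [PySem.Chars.count.go, List.isPrefixOf, hx]]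
        rw [ih t acc (by simp only [List.length_cons] at h; omega)]
        have hxc : (x == c) = false := beq_eq_false_iff_ne.mpr (fun hh => hx hh.symm)
        simp [List.count_cons, hxc]

theorem count_singleton (cs : List Char) (c : Char) :
    PySem.Chars.count cs [c] = cs.count c := by
  unfold PySem.Chars.count
  simp [count_go_singleton c cs.length cs 0 le_rfl]

-- field laws of one scan step
theorem altStep_ob (st : ScanSt) (ch : Char) :
    (altStep st ch).ob = if ch = '{' then st.ob + 1 else st.ob := by
  simp only [altStep]; split_ifs <;> simp_all
theorem altStep_cb (st : ScanSt) (ch : Char) :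
    (altStep st ch).cb = if ch = '}' then st.cb + 1 else st.cb := by
  simp only [altStep]; split_ifs <;> simp_all
theorem altStep_op (st : ScanSt) (ch : Char) :
    (altStep st ch).op = if ch = '(' then st.op + 1 else st.op := by
  simp only [altStep]; split_ifs <;> simp_all
theorem altStep_cp (st : ScanSt) (ch : Char) :
    (altStep st ch).cp = if ch = ')' then st.cp + 1 else st.cp := by
  simp only [altStep]; split_ifs <;> simp_all
theorem altStep_osq (st : ScanSt) (ch : Char) :
    (altStep st ch).osq = if ch = '[' then st.osq + 1 else st.osq := by
  simp only [altStep]; split_ifs <;> simp_all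
theorem altStep_csq (st : ScanSt) (ch : Char) :
    (altStep st ch).csq = if ch = ']' then st.csq + 1 else st.csq := by
  simp only [altStep]; split_ifs <;> simp_all
theorem altStep_cur (st : ScanSt) (ch : Char) :
    (altStep st ch).cur = if ch = '\n' then [] else st.cur ++ [ch] := by
  simp only [altStep]; split_ifs <;> simp_all
theorem altStep_subs (st : ScanSt) (ch : Char) :
    (altStep st ch).subs
      = if ch = '\n' then (if altSub st.cur then st.subs + 1 else st.subs) else st.subs := by
  simp only [altStep]; split_ifs <;> simp_all

theorem foldl_field (f : ScanSt → Nat) (c : Char)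
    (hstep : ∀ st ch, f (altStep st ch) = if ch = c then f st + 1 else f st) :
    ∀ (cs : List Char) (st : ScanSt),
      f (cs.foldl altStep st) = f st + cs.count c := by
  intro cs
  induction cs with
  | nil => intro st; simp
  | cons x t ih =>
    intro st
    simp only [List.foldl_cons, ih, hstep, List.count_cons]
    split_ifs with h <;> simp_all <;> omega

theorem foldl_lines : ∀ (cs : List Char) (st : ScanSt),
    (if altSub (cs.foldl altStep st).cur then (cs.foldl altStep st).subs + 1
      else (cs.foldl altStep st).subs)
    = st.subs + (mapFirst (fun p => st.cur ++ p) (linesOf cs)).countP (fun p => altSub p) := by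
  intro cs
  induction cs with
  | nil =>
    intro st
    simp [linesOf, mapFirst, List.countP_cons]
    split_ifs <;> simp_all
  | cons c rest ih =>
    intro st
    by_cases hc : c = '\n'
    · subst hc
      simp only [List.foldl_cons, ih, altStep_subs, altStep_cur, if_true]
      have hid : mapFirst (fun p => [] ++ p) (linesOf rest) = linesOf rest := by
        cases hr : linesOf rest <;> simp [mapFirst]
      rw [hid]
      simp only [linesOf, if_true]
      cases hr : linesOf rest with
      | nil => exact absurd hr (linesOf_ne_nil rest)
      | cons x xs =>
        simp [mapFirst, List.countP_cons]
        split_ifs <;> omega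
    · simp only [List.foldl_cons, ih, altStep_subs, altStep_cur, if_neg hc]
      simp only [linesOf, if_neg hc, mapFirst_mapFirst]
      have : (fun p => st.cur ++ c :: p) = (fun p => (st.cur ++ [c]) ++ p) := by
        funext p; simp
      simp [this]

-- the Str-level filter test of port A is altSub on the underlying character list
theorem strip_ofList_eq_empty_iff (p : List Char) :
    PySem.Str.strip (String.ofList p) = "" ↔ PySem.Chars.strip p = [] := by
  constructor
  · intro h
    have := congrArg String.toList h
    simpa [PySem.Str.toList_strip] using this
  · intro h
    apply String.toList_inj.mp
    simp [PySem.Str.toList_strip, h]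

theorem q_ofList (p : List Char) :
    (!(PySem.Str.strip (String.ofList p) == "")
      && !(PySem.Str.startswith (PySem.Str.strip (String.ofList p)) "//")) = altSub p := by
  have hsw : PySem.Str.startswith (PySem.Str.strip (String.ofList p)) "//"
      = PySem.Chars.startswith (PySem.Chars.strip p) ['/', '/'] := by
    rw [PySem.Str.startswith_eq, show ("//" : String).toList = ['/', '/'] from rfl]
    congr 1
    simp [PySem.Str.toList_strip]
  by_cases h : PySem.Chars.strip p = []
  · simp [altSub, h, (strip_ofList_eq_empty_iff p).mpr h]
  · have hne : PySem.Str.strip (String.ofList p) ≠ "" :=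
      fun hc => h ((strip_ofList_eq_empty_iff p).mp hc)
    simp [altSub, h, beq_eq_false_iff_ne.mpr hne]

theorem checkA_eq_altScan (code : String) : checkA code = altScan code := by
  unfold checkA altScan
  have hsplit : (PySem.Str.split? code "\n").getD []
      = (linesOf code.toList).map String.ofList := by
    rw [show PySem.Str.split? code "\n"
          = Option.map (List.map String.ofList) (PySem.Chars.split? code.toList "\n".toList) from rfl]
    rw [show ("\n" : String).toList = ['\n'] by decide]
    simp [PySem.Chars.split?, splitOn_newline]
  have hlen : ((((PySem.Str.split? code "\n").getD []).filter
      (fun l => !(PySem.Str.strip l == "") && !(PySem.Str.startswith (PySem.Str.strip l) "//"))).map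
      PySem.Str.strip).length
      = (linesOf code.toList).countP (fun p => altSub p) := by
    rw [hsplit, List.length_map, ← List.countP_eq_length_filter, List.countP_map]
    have hfun : ((fun l => !(PySem.Str.strip l == "")
          && !(PySem.Str.startswith (PySem.Str.strip l) "//")) ∘ String.ofList)
        = fun p => altSub p := by
      funext p
      simpa [Function.comp] using q_ofList p
    rw [hfun]
  have hsubs : (if altSub ((code.toList.foldl altStep ⟨0,0,0,0,0,0,[],0⟩)).cur
        then ((code.toList.foldl altStep ⟨0,0,0,0,0,0,[],0⟩)).subs + 1
        else ((code.toList.foldl altStep ⟨0,0,0,0,0,0,[],0⟩)).subs)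
      = (linesOf code.toList).countP (fun p => altSub p) := by
    rw [foldl_lines code.toList ⟨0,0,0,0,0,0,[],0⟩]
    have hid : mapFirst (fun p => (⟨0,0,0,0,0,0,[],0⟩ : ScanSt).cur ++ p) (linesOf code.toList)
        = linesOf code.toList := by
      cases hr : linesOf code.toList <;> simp [mapFirst]
    rw [hid]
    simp
  have hcnt : ∀ (c : Char), PySem.Str.count code (String.ofList [c]) = code.toList.count c := by
    intro c
    rw [PySem.Str.count_eq]
    simp [count_singleton]
  have hob : ((code.toList.foldl altStep ⟨0,0,0,0,0,0,[],0⟩)).ob = code.toList.count '{' := by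
    simpa using foldl_field ScanSt.ob '{' altStep_ob code.toList ⟨0,0,0,0,0,0,[],0⟩
  have hcb : ((code.toList.foldl altStep ⟨0,0,0,0,0,0,[],0⟩)).cb = code.toList.count '}' := by
    simpa using foldl_field ScanSt.cb '}' altStep_cb code.toList ⟨0,0,0,0,0,0,[],0⟩
  have hop : ((code.toList.foldl altStep ⟨0,0,0,0,0,0,[],0⟩)).op = code.toList.count '(' := by
    simpa using foldl_field ScanSt.op '(' altStep_op code.toList ⟨0,0,0,0,0,0,[],0⟩
  have hcp : ((code.toList.foldl altStep ⟨0,0,0,0,0,0,[],0⟩)).cp = code.toList.count ')' := by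
    simpa using foldl_field ScanSt.cp ')' altStep_cp code.toList ⟨0,0,0,0,0,0,[],0⟩
  have hosq : ((code.toList.foldl altStep ⟨0,0,0,0,0,0,[],0⟩)).osq = code.toList.count '[' := by
    simpa using foldl_field ScanSt.osq '[' altStep_osq code.toList ⟨0,0,0,0,0,0,[],0⟩
  have hcsq : ((code.toList.foldl altStep ⟨0,0,0,0,0,0,[],0⟩)).csq = code.toList.count ']' := by
    simpa using foldl_field ScanSt.csq ']' altStep_csq code.toList ⟨0,0,0,0,0,0,[],0⟩
  rw [show ("{" : String) = String.ofList ['{'] by rfl,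
      show ("}" : String) = String.ofList ['}'] by rfl,
      show ("(" : String) = String.ofList ['('] by rfl,
      show (")" : String) = String.ofList [')'] by rfl,
      show ("[" : String) = String.ofList ['['] by rfl,
      show ("]" : String) = String.ofList [']'] by rfl]
  simp only [hlen, hsubs, hob, hcb, hop, hcp, hosq, hcsq, hcnt]
  split_ifs <;> simp_all

-- ===== VERDICT (by name: the statement is the Claim_ definition above) =====
theorem validate_rust_syntax_py_spec : Claim_equal_validate_rust_syntax_py := by
  intro before_code after_code _
  unfold Spec_validate_rust_syntax_py validate_rust_syntax_py validate_rust_syntax_py_alt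
  simp [List.all, checkA_eq_altScan]
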